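-- pv_equiv track=rewrite | github.com/Shrey-Parekh/RusumeAI | unified_resume_platform/backend/models/resume_generator.py | _generate_skills_section
-- ===== SOURCE A (Python) =====
-- from typing import Dict, List, Any, Tuple
--
-- def _generate_skills_section(skills: Dict[str, List[str]], job_analysis: Dict[str, Any]) -> Dict[str, List[str]]:
--     """Generate tailored skills section"""
--     if not skills:
--         return {}
--
--     job_skills = job_analysis.get("required_skills", []) + job_analysis.get("preferred_skills", [])
--     job_skills_lower = [skill.lower() for skill in job_skills]
--
--     tailored_skills = {}
--
--     for skill_type, skill_list in skills.items():
--         if not skill_list: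
--             continue
--
--         # Prioritize skills that match job requirements
--         prioritized_skills = []
--         other_skills = []
--
--         for skill in skill_list:
--             if any(job_skill in skill.lower() for job_skill in job_skills_lower):
--                 prioritized_skills.append(skill)
--             else:
--                 other_skills.append(skill)
--
--         # Combine prioritized skills first, then others
--         combined_skills = prioritized_skills + other_skills
--         tailored_skills[skill_type] = combined_skills[:10]  # Limit to top 10
--
--     return tailored_skills
-- ===== SOURCE B (Python) =====
-- def _generate_skills_section(skills, job_analysis):
--     """Generate tailored skills section"""
--     if not skills:
--         return {}
--
--     job_skills_lower = [s.lower() for s in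
--                         job_analysis.get("required_skills", []) + job_analysis.get("preferred_skills", [])]
--
--     def misses_job(skill):
--         low = skill.lower()
--         return all(job_skill not in low for job_skill in job_skills_lower)
--
--     # Stable sort: skills matching a job requirement (key False) come first,
--     # original order preserved within each group; cap at 10.
--     return {skill_type: sorted(skill_list, key=misses_job)[:10]
--             for skill_type, skill_list in skills.items() if skill_list}
-- ===== Notes on version B (the rewrite author's own statement) =====
-- stated objective: idiomatic
-- what changed: The explicit prioritized/other two-accumulator partition loop plus concatenation is replaced by a single stable sort with a boolean key (misses-job last) inside a dict comprehension that also absorbs the empty-list skip and the accumulator dict.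
import Mathlib
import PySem

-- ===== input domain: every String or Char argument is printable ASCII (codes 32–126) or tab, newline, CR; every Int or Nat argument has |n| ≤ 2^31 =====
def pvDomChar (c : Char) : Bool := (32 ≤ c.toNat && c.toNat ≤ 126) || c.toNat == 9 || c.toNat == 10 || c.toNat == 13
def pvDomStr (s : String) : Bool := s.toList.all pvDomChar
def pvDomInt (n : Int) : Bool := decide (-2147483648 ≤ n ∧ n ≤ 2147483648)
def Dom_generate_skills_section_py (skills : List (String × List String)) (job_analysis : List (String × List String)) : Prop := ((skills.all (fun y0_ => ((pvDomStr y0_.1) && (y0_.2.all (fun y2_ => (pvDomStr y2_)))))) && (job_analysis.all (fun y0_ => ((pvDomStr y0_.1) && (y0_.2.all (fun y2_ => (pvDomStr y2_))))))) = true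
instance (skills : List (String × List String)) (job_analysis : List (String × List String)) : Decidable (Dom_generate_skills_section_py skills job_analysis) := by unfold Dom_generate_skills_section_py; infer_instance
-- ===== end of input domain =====

-- B replaces A's two-accumulator partition loop and explicit result dict by a stable
-- boolean-key sort inside a dict comprehension (idiomatic; no speed claim).

-- ===== PORT A =====
def generate_skills_section_py (skills : List (String × List String)) (job_analysis : List (String × List String)) : List (String × List String) :=
  if skills.isEmpty then []
  else
    let job_skills := ((job_analysis.lookup "required_skills").getD []) ++ ((job_analysis.lookup "preferred_skills").getD [])
    let job_skills_lower := job_skills.map PySem.Str.lower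
    let tailored_skills : PySem.Dict String (List String) :=
      skills.foldl (fun tailored p =>
        if p.2.isEmpty then tailored
        else
          let pr_ot := p.2.foldl (fun (acc : List String × List String) skill =>
            if job_skills_lower.any (fun job_skill => PySem.Str.isIn job_skill (PySem.Str.lower skill)) then
              (acc.1 ++ [skill], acc.2)
            else
              (acc.1, acc.2 ++ [skill])) ([], [])
          let combined_skills := pr_ot.1 ++ pr_ot.2
          tailored.insert p.1 (PySem.List.slice combined_skills none (some 10))) PySem.Dict.empty
    tailored_skills.items

-- ===== PORT B =====
def generate_skills_section_py_alt (skills : List (String × List String)) (job_analysis : List (String × List String)) : List (String × List String) :=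
  if skills.isEmpty then []
  else
    let job_skills_lower := (((job_analysis.lookup "required_skills").getD []) ++ ((job_analysis.lookup "preferred_skills").getD [])).map PySem.Str.lower
    let misses_job : String → Bool := fun skill =>
      job_skills_lower.all (fun job_skill => !(PySem.Str.isIn job_skill (PySem.Str.lower skill)))
    skills.filterMap (fun p =>
      if p.2.isEmpty then none
      else some (p.1, PySem.List.slice (PySem.List.sorted p.2 misses_job) none (some 10)))

-- ===== PRECONDITION & SPEC =====
-- Pre_ excludes association lists with duplicate keys in either dict argument: a Python
-- dict cannot hold duplicate keys, so such lists do not encode one input unambiguously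
-- and A's overwrite-vs-first-match behaviour there is an artefact of the encoding.
def Pre_generate_skills_section_py (skills : List (String × List String)) (job_analysis : List (String × List String)) : Prop :=
  (skills.map Prod.fst).Nodup ∧ (job_analysis.map Prod.fst).Nodup
instance (skills : List (String × List String)) (job_analysis : List (String × List String)) : Decidable (Pre_generate_skills_section_py skills job_analysis) := by unfold Pre_generate_skills_section_py; infer_instance
def pvWitness_generate_skills_section_py : (List (String × List String)) × (List (String × List String)) :=
  ([("technical", ["Python", "Excel"])], [("required_skills", ["python"])])
def Spec_generate_skills_section_py (skills : List (String × List String)) (job_analysis : List (String × List String)) (out : List (String × List String)) : Prop := out = generate_skills_section_py_alt skills job_analysis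
instance (skills : List (String × List String)) (job_analysis : List (String × List String)) (out : List (String × List String)) : Decidable (Spec_generate_skills_section_py skills job_analysis out) := by unfold Spec_generate_skills_section_py; infer_instance

-- ===== CLAIM (what is proved, stated in full; the proofs are below) =====
def Claim_equal_generate_skills_section_py : Prop := ∀ (skills : List (String × List String)) (job_analysis : List (String × List String)), Dom_generate_skills_section_py skills job_analysis → Pre_generate_skills_section_py skills job_analysis → Spec_generate_skills_section_py skills job_analysis (generate_skills_section_py skills job_analysis)

-- ===== LEMMAS AND PROOFS =====

-- A's inner loop is a filter-based partition.
theorem foldl_partition (hit : String → Bool) (xs : List String) (a b : List String) :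
    xs.foldl (fun (acc : List String × List String) skill =>
      if hit skill then (acc.1 ++ [skill], acc.2) else (acc.1, acc.2 ++ [skill])) (a, b)
    = (a ++ xs.filter hit, b ++ xs.filter (fun s => !hit s)) := by
  induction xs generalizing a b with
  | nil => simp
  | cons x xs ih =>
    by_cases h : hit x = true <;> simp [List.foldl_cons, h, ih]

-- insertBy with a Bool key: a key-false element goes after the false block, before the true block.
theorem insertBy_bool_false (key : String → Bool) (x : String) (hx : key x = false)
    (hs ms : List String) (hh : ∀ y ∈ hs, key y = false) (hm : ∀ y ∈ ms, key y = true) :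
    PySem.List.insertBy (fun a b => decide (key a < key b)) x (hs ++ ms) = hs ++ x :: ms := by
  induction hs with
  | nil =>
    cases ms with
    | nil => simp [PySem.List.insertBy]
    | cons m ms =>
      have : key m = true := hm m (by simp)
      simp [PySem.List.insertBy, hx, this]
  | cons h hs ih =>
    have hk : key h = false := hh h (by simp)
    simp only [List.cons_append, PySem.List.insertBy, hx, hk]
    simp [ih (fun y hy => hh y (by simp [hy]))]

-- insertBy with a Bool key: a key-true element is appended at the end.
theorem insertBy_bool_true (key : String → Bool) (x : String) (hx : key x = true) (ys : List String) :
    PySem.List.insertBy (fun a b => decide (key a < key b)) x ys = ys ++ [x] := by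
  apply PySem.List.insertBy_of_forall_not_before
  intro y _
  cases hky : key y <;> simp [hx, hky]

-- Loop invariant for the stable insertion sort with a Bool key.
theorem foldl_insertBy_bool (key : String → Bool) (xs : List String) (hs ms : List String)
    (hh : ∀ y ∈ hs, key y = false) (hm : ∀ y ∈ ms, key y = true) :
    xs.foldl (fun acc x => PySem.List.insertBy (fun a b => decide (key a < key b)) x acc) (hs ++ ms)
    = (hs ++ xs.filter (fun s => !key s)) ++ (ms ++ xs.filter key) := by
  induction xs generalizing hs ms with
  | nil => simp
  | cons x xs ih =>
    cases hx : key x with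
    | false =>
      have h1 : PySem.List.insertBy (fun a b => decide (key a < key b)) x (hs ++ ms)
          = (hs ++ [x]) ++ ms := by
        rw [insertBy_bool_false key x hx hs ms hh hm]; simp
      rw [List.foldl_cons, h1, ih (hs ++ [x]) ms
        (by intro y hy; rcases List.mem_append.mp hy with h | h
            · exact hh y h
            · simp at h; simpa [h] using hx) hm]
      simp [hx]
    | true =>
      have h1 : PySem.List.insertBy (fun a b => decide (key a < key b)) x (hs ++ ms)
          = hs ++ (ms ++ [x]) := by
        rw [insertBy_bool_true key x hx]; simp
      rw [List.foldl_cons, h1, ih hs (ms ++ [x]) hh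
        (by intro y hy; rcases List.mem_append.mp hy with h | h
            · exact hm y h
            · simp at h; simpa [h] using hx)]
      simp [hx]

-- Python's stable sort with a Bool key is exactly "false block ++ true block".
theorem sorted_bool_key (key : String → Bool) (xs : List String) :
    PySem.List.sorted xs key = xs.filter (fun s => !key s) ++ xs.filter key := by
  rw [PySem.List.sorted_eq_foldl_insertBy]
  simpa using foldl_insertBy_bool key xs [] [] (by simp) (by simp)

-- all-not is the negation of any.
theorem all_not_eq_not_any (l : List String) (p : String → Bool) :
    (l.all fun j => !p j) = !(l.any p) := by
  induction l with
  | nil => simp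
  | cons x l ih => simp [List.all_cons, List.any_cons, ih]

-- The fresh-distinct-keys conditional insert loop over a Dict is a filterMap.
theorem foldl_insert_filterMap (v : String × List String → List String)
    (skills : List (String × List String)) (d : PySem.Dict String (List String))
    (hfresh : ∀ p ∈ skills, d.contains p.1 = false)
    (hnd : (skills.map Prod.fst).Nodup) :
    (skills.foldl (fun (tailored : PySem.Dict String (List String)) p =>
        if p.2.isEmpty then tailored else tailored.insert p.1 (v p)) d).items
    = d.items ++ skills.filterMap (fun p => if p.2.isEmpty then none else some (p.1, v p)) := by
  induction skills generalizing d with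
  | nil => simp
  | cons p skills ih =>
    simp only [List.map_cons, List.nodup_cons] at hnd
    by_cases hp : p.2.isEmpty
    · rw [List.foldl_cons, if_pos hp, ih d (fun q hq => hfresh q (by simp [hq])) hnd.2]
      simp [List.filterMap_cons, List.isEmpty_iff.mp hp]
    · rw [List.foldl_cons, if_neg hp,
        ih (d.insert p.1 (v p))
          (by intro q hq
              rw [PySem.Dict.contains_insert]
              have h1 : d.contains q.1 = false := hfresh q (by simp [hq])
              have h2 : q.1 ≠ p.1 := by
                intro he
                exact hnd.1 (by rw [← he]; exact List.mem_map.mpr ⟨q, hq, rfl⟩)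
              simp [h1, h2])
          hnd.2]
      rw [PySem.Dict.items_insert_of_not_contains d (v p) (hfresh p (by simp))]
      have hne : p.2 ≠ [] := by simpa [List.isEmpty_iff] using hp
      simp [List.filterMap_cons, hne]

-- ===== VERDICT (by name: the statement is the Claim_ definition above) =====
theorem generate_skills_section_py_spec : Claim_equal_generate_skills_section_py := by
  intro skills job_analysis _hdom hpre
  unfold Spec_generate_skills_section_py generate_skills_section_py generate_skills_section_py_alt
  by_cases hs : skills.isEmpty
  · simp [hs]
  · simp only [hs, if_neg, Bool.false_eq_true, not_false_iff, if_false]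
    set jsl := (((job_analysis.lookup "required_skills").getD []) ++ ((job_analysis.lookup "preferred_skills").getD [])).map PySem.Str.lower with hjsl
    have hcont : ∀ p ∈ skills, (PySem.Dict.empty : PySem.Dict String (List String)).contains p.1 = false := by
      intro p _; simp [PySem.Dict.contains_empty]
    rw [foldl_insert_filterMap _ skills PySem.Dict.empty hcont hpre.1]
    have hemp : (PySem.Dict.empty : PySem.Dict String (List String)).items = [] := rfl
    rw [hemp, List.nil_append]
    apply List.filterMap_congr
    intro p _
    by_cases hp : p.2.isEmpty
    · simp [hp]
    · simp only [hp, Bool.false_eq_true, if_false]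
      rw [foldl_partition, sorted_bool_key]
      simp only [List.nil_append]
      have h2 : (List.filter (fun s => !jsl.all fun j => !PySem.Str.isIn j (PySem.Str.lower s)) p.2)
              = List.filter (fun s => jsl.any fun j => PySem.Str.isIn j (PySem.Str.lower s)) p.2 := by
        apply List.filter_congr; intro s _; rw [all_not_eq_not_any, Bool.not_not]
      have h3 : (List.filter (fun s => jsl.all fun j => !PySem.Str.isIn j (PySem.Str.lower s)) p.2)
              = List.filter (fun s => !jsl.any fun j => PySem.Str.isIn j (PySem.Str.lower s)) p.2 := by
        apply List.filter_congr; intro s _; rw [all_not_eq_not_any]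
      rw [h2, h3]
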